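-- pv_equiv track=rewrite | github.com/brunowinter8192/PostgresRuntimeEval | General/Konzepte/Hybrid/Model_Prediction/Testing_Framework/02_q9_pattern_depths.py | format_pattern_key
-- ===== SOURCE A (Python) =====
-- def format_pattern_key(parent_type, children):
--     children_info = [(child['node_type'], child['relationship']) for child in children]
--     children_sorted = sorted(children_info, key=lambda x: (0 if x[1] == 'Outer' else 1 if x[1] == 'Inner' else 2, x[0]))
--
--     if len(children_sorted) == 1:
--         return f"{parent_type} → {children_sorted[0][0]} ({children_sorted[0][1]})"
--     else:
--         children_str = ', '.join([f"{ct} ({rel})" for ct, rel in children_sorted])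
--         return f"{parent_type} → [{children_str}]"
-- ===== SOURCE B (Python) =====
-- def format_pattern_key(parent_type, children):
--     outer, inner, other = [], [], []
--     for child in children:
--         pair = (child['node_type'], child['relationship'])
--         rel = pair[1]
--         if rel == 'Outer':
--             outer.append(pair)
--         elif rel == 'Inner':
--             inner.append(pair)
--         else:
--             other.append(pair)
--     outer.sort(key=lambda x: x[0])
--     inner.sort(key=lambda x: x[0])
--     other.sort(key=lambda x: x[0])
--     children_sorted = outer + inner + other
--     if len(children_sorted) == 1:
--         ct, rel = children_sorted[0]
--         return f"{parent_type} → {ct} ({rel})"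
--     children_str = ', '.join(f"{ct} ({rel})" for ct, rel in children_sorted)
--     return f"{parent_type} → [{children_str}]"
-- ===== Notes on version B (the rewrite author's own statement) =====
-- stated objective: alternative
-- what changed: Replaces A's single stable sort under a composite (relationship-rank, node_type) key by a one-pass three-way partition on relationship ('Outer'/'Inner'/other) followed by a stable node_type-only sort per bucket, concatenated in rank order.
import Mathlib
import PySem

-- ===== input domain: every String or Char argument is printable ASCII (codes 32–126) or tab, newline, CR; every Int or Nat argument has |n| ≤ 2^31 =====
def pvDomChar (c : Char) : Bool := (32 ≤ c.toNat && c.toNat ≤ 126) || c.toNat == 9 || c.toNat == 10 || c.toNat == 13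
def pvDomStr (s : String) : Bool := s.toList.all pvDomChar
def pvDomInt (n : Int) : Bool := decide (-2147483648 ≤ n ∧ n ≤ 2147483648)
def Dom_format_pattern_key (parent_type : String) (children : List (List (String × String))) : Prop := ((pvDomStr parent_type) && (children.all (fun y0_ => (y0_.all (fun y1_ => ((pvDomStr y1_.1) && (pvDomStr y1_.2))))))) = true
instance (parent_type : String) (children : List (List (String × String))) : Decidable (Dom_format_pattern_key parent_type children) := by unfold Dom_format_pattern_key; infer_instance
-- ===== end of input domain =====

-- B replaces A's single stable sort under a composite (rank, node_type) key by a one-pass three-way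
-- partition on relationship followed by a stable node_type-only sort per bucket (objective: alternative).

-- ===== PORT A =====
-- rank of the relationship string inside the composite sort key of A
def pvRank (rel : String) : Int := if rel == "Outer" then 0 else if rel == "Inner" then 1 else 2

def format_pattern_key (parent_type : String) (children : List (List (String × String))) : String :=
  let children_info := children.map (fun child =>
    ((PySem.Dict.mk child).getD "node_type" "", (PySem.Dict.mk child).getD "relationship" ""))
  let children_sorted := PySem.List.sorted2 children_info (fun x => pvRank x.2) (fun x => x.1)
  if children_sorted.length = 1 then
    let c := children_sorted.headD ("", "")
    parent_type ++ " → " ++ c.1 ++ " (" ++ c.2 ++ ")"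
  else
    parent_type ++ " → [" ++
      PySem.Str.join ", " (children_sorted.map (fun p => p.1 ++ " (" ++ p.2 ++ ")")) ++ "]"

-- ===== PORT B =====
-- the loop body of B's one-pass partition: route each child's (node_type, relationship) pair to its bucket
def pvStep (acc : List (String × String) × List (String × String) × List (String × String))
    (child : List (String × String)) :
    List (String × String) × List (String × String) × List (String × String) :=
  let pair := ((PySem.Dict.mk child).getD "node_type" "", (PySem.Dict.mk child).getD "relationship" "")
  if pair.2 == "Outer" then (acc.1 ++ [pair], acc.2.1, acc.2.2)
  else if pair.2 == "Inner" then (acc.1, acc.2.1 ++ [pair], acc.2.2)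
  else (acc.1, acc.2.1, acc.2.2 ++ [pair])

def format_pattern_key_alt (parent_type : String) (children : List (List (String × String))) : String :=
  let t := children.foldl pvStep ([], [], [])
  let children_sorted :=
    PySem.List.sorted t.1 (fun x => x.1) ++ PySem.List.sorted t.2.1 (fun x => x.1)
      ++ PySem.List.sorted t.2.2 (fun x => x.1)
  if children_sorted.length = 1 then
    let c := children_sorted.headD ("", "")
    parent_type ++ " → " ++ c.1 ++ " (" ++ c.2 ++ ")"
  else
    parent_type ++ " → [" ++
      PySem.Str.join ", " (children_sorted.map (fun p => p.1 ++ " (" ++ p.2 ++ ")")) ++ "]"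

-- ===== PRECONDITION & SPEC =====
-- A raises KeyError on any child dict missing the key 'node_type' or 'relationship'; Pre_ excludes exactly those.
def Pre_format_pattern_key (parent_type : String) (children : List (List (String × String))) : Prop :=
  ∀ child ∈ children, "node_type" ∈ child.map Prod.fst ∧ "relationship" ∈ child.map Prod.fst
instance (parent_type : String) (children : List (List (String × String))) : Decidable (Pre_format_pattern_key parent_type children) := by unfold Pre_format_pattern_key; infer_instance

def pvWitness_format_pattern_key : String × (List (List (String × String))) :=
  ("Hash Join", [[("node_type", "Seq Scan"), ("relationship", "Inner")],
                 [("node_type", "Index Scan"), ("relationship", "Outer")]])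

def Spec_format_pattern_key (parent_type : String) (children : List (List (String × String))) (out : String) : Prop := out = format_pattern_key_alt parent_type children
instance (parent_type : String) (children : List (List (String × String))) (out : String) : Decidable (Spec_format_pattern_key parent_type children out) := by unfold Spec_format_pattern_key; infer_instance

-- ===== CLAIM (what is proved, stated in full; the proofs are below) =====
def Claim_equal_format_pattern_key : Prop := ∀ (parent_type : String) (children : List (List (String × String))), Dom_format_pattern_key parent_type children → Pre_format_pattern_key parent_type children → Spec_format_pattern_key parent_type children (format_pattern_key parent_type children)

-- ===== LEMMAS AND PROOFS =====

-- the comparison function of A's composite-key insertion sort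
def pvLexB (a b : String × String) : Bool :=
  decide (pvRank a.2 < pvRank b.2) || (!decide (pvRank b.2 < pvRank a.2) && decide (a.1 < b.1))
-- the comparison function of a node_type-only insertion sort
def pvNtB (a b : String × String) : Bool := decide (a.1 < b.1)

theorem pvRank_zero {s : String} (h : pvRank s = 0) : (s == "Outer") = true ∧ (s == "Inner") = false := by
  unfold pvRank at h; split_ifs at h with h1 h2 <;> simp_all

theorem pvRank_one {s : String} (h : pvRank s = 1) : (s == "Outer") = false ∧ (s == "Inner") = true := by
  unfold pvRank at h; split_ifs at h with h1 h2 <;> simp_all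

theorem pvRank_two {s : String} (h : pvRank s = 2) : (s == "Outer") = false ∧ (s == "Inner") = false := by
  unfold pvRank at h; split_ifs at h with h1 h2 <;> simp_all

theorem pvRank_cases (s : String) : pvRank s = 0 ∨ pvRank s = 1 ∨ pvRank s = 2 := by
  unfold pvRank; split_ifs <;> simp

theorem pv_insertBy_congr {α : Type} (before before' : α → α → Bool) (x : α) (ys : List α)
    (h : ∀ y ∈ ys, before x y = before' x y) :
    PySem.List.insertBy before x ys = PySem.List.insertBy before' x ys := by
  induction ys with
  | nil => rfl
  | cons a ys ih =>
    simp only [PySem.List.insertBy, h a (List.mem_cons_self ..)]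
    split
    · rfl
    · rw [ih (fun y hy => h y (List.mem_cons_of_mem _ hy))]

theorem pv_insertBy_append_cons {α : Type} (before : α → α → Bool) (x b : α) (A B : List α)
    (h : before x b = true) :
    PySem.List.insertBy before x (A ++ b :: B) = PySem.List.insertBy before x A ++ b :: B := by
  induction A with
  | nil => simp [PySem.List.insertBy, h]
  | cons a A ih =>
    simp only [List.cons_append, PySem.List.insertBy]
    split
    · rfl
    · simp [ih]

theorem pv_insertBy_skip {α : Type} (before : α → α → Bool) (x : α) (A B : List α)
    (h : ∀ y ∈ A, before x y = false) :
    PySem.List.insertBy before x (A ++ B) = A ++ PySem.List.insertBy before x B := by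
  induction A with
  | nil => rfl
  | cons a A ih =>
    simp only [List.cons_append, PySem.List.insertBy, h a (List.mem_cons_self ..)]
    simp [ih (fun y hy => h y (List.mem_cons_of_mem _ hy))]

theorem pv_insert_front (x : String × String) (A R : List (String × String))
    (hR : ∀ y ∈ R, pvLexB x y = true) (hA : ∀ y ∈ A, pvLexB x y = pvNtB x y) :
    PySem.List.insertBy pvLexB x (A ++ R) = PySem.List.insertBy pvNtB x A ++ R := by
  cases R with
  | nil => simpa using pv_insertBy_congr _ _ x A hA
  | cons b B =>
    rw [pv_insertBy_append_cons _ _ _ _ _ (hR b (List.mem_cons_self ..)),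
        pv_insertBy_congr _ _ x A hA]

-- the partition invariant: A's lexicographic insertion-sort fold distributes over the three buckets
theorem pv_part_foldl (xs : List (String × String)) :
    ∀ (A0 A1 A2 : List (String × String)),
    (∀ y ∈ A0, pvRank y.2 = 0) → (∀ y ∈ A1, pvRank y.2 = 1) → (∀ y ∈ A2, pvRank y.2 = 2) →
    xs.foldl (fun acc x => PySem.List.insertBy pvLexB x acc) (A0 ++ A1 ++ A2)
    = (xs.filter (fun x => x.2 == "Outer")).foldl (fun acc x => PySem.List.insertBy pvNtB x acc) A0
      ++ (xs.filter (fun x => x.2 == "Inner")).foldl (fun acc x => PySem.List.insertBy pvNtB x acc) A1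
      ++ (xs.filter (fun x => !(x.2 == "Outer") && !(x.2 == "Inner"))).foldl (fun acc x => PySem.List.insertBy pvNtB x acc) A2 := by
  induction xs with
  | nil => intro A0 A1 A2 _ _ _; rfl
  | cons x xs ih =>
    intro A0 A1 A2 h0 h1 h2
    rcases pvRank_cases x.2 with hx | hx | hx
    · -- Outer bucket
      obtain ⟨hOut, hInn⟩ := pvRank_zero hx
      have step : PySem.List.insertBy pvLexB x (A0 ++ (A1 ++ A2))
          = PySem.List.insertBy pvNtB x A0 ++ (A1 ++ A2) := by
        apply pv_insert_front
        · intro y hy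
          rcases List.mem_append.mp hy with hy | hy
          · simp [pvLexB, hx, h1 y hy]
          · simp [pvLexB, hx, h2 y hy]
        · intro y hy; simp [pvLexB, pvNtB, hx, h0 y hy]
      simp only [List.foldl_cons, List.filter_cons, hOut, hInn, Bool.not_true, Bool.false_and, if_true]
      rw [List.append_assoc, step, ← List.append_assoc]
      exact ih _ _ _ (fun y hy => by
          rcases (PySem.List.mem_insertBy _ _ _ _).mp hy with rfl | hy
          · exact hx
          · exact h0 y hy) h1 h2
    · -- Inner bucket
      obtain ⟨hOut, hInn⟩ := pvRank_one hx
      have step : PySem.List.insertBy pvLexB x (A0 ++ (A1 ++ A2))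
          = A0 ++ (PySem.List.insertBy pvNtB x A1 ++ A2) := by
        rw [pv_insertBy_skip _ _ _ _ (fun y hy => by simp [pvLexB, hx, h0 y hy])]
        congr 1
        apply pv_insert_front
        · intro y hy; simp [pvLexB, hx, h2 y hy]
        · intro y hy; simp [pvLexB, pvNtB, hx, h1 y hy]
      simp only [List.foldl_cons, List.filter_cons, hOut, hInn, Bool.not_true, Bool.not_false,
        Bool.and_false, if_true]
      rw [List.append_assoc, step, ← List.append_assoc]
      exact ih _ _ _ h0 (fun y hy => by
          rcases (PySem.List.mem_insertBy _ _ _ _).mp hy with rfl | hy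
          · exact hx
          · exact h1 y hy) h2
    · -- other bucket
      obtain ⟨hOut, hInn⟩ := pvRank_two hx
      have step : PySem.List.insertBy pvLexB x (A0 ++ (A1 ++ A2))
          = A0 ++ (A1 ++ PySem.List.insertBy pvNtB x A2) := by
        rw [pv_insertBy_skip _ _ _ _ (fun y hy => by simp [pvLexB, hx, h0 y hy])]
        congr 1
        rw [pv_insertBy_skip _ _ _ _ (fun y hy => by simp [pvLexB, hx, h1 y hy])]
        congr 1
        exact pv_insertBy_congr _ _ _ _ (fun y hy => by simp [pvLexB, pvNtB, hx, h2 y hy])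
      simp only [List.foldl_cons, List.filter_cons, hOut, hInn, Bool.not_false, Bool.true_and,
        if_true]
      rw [List.append_assoc, step, ← List.append_assoc]
      exact ih _ _ _ h0 h1 (fun y hy => by
          rcases (PySem.List.mem_insertBy _ _ _ _).mp hy with rfl | hy
          · exact hx
          · exact h2 y hy)

-- A's composite sort equals the bucketed node_type-only sorts
theorem pv_sorted2_eq_buckets (info : List (String × String)) :
    PySem.List.sorted2 info (fun x => pvRank x.2) (fun x => x.1)
    = PySem.List.sorted (info.filter (fun x => x.2 == "Outer")) (fun x => x.1)
      ++ PySem.List.sorted (info.filter (fun x => x.2 == "Inner")) (fun x => x.1)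
      ++ PySem.List.sorted (info.filter (fun x => !(x.2 == "Outer") && !(x.2 == "Inner"))) (fun x => x.1) :=
  pv_part_foldl info [] [] [] (by simp) (by simp) (by simp)

-- B's partition fold computes the three relationship filters of the mapped info list
theorem pv_part3 (children : List (List (String × String))) :
    ∀ (a b c : List (String × String)),
    children.foldl pvStep (a, b, c)
    = (a ++ (children.map (fun child => ((PySem.Dict.mk child).getD "node_type" "", (PySem.Dict.mk child).getD "relationship" ""))).filter (fun x => x.2 == "Outer"),
       b ++ (children.map (fun child => ((PySem.Dict.mk child).getD "node_type" "", (PySem.Dict.mk child).getD "relationship" ""))).filter (fun x => x.2 == "Inner"),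
       c ++ (children.map (fun child => ((PySem.Dict.mk child).getD "node_type" "", (PySem.Dict.mk child).getD "relationship" ""))).filter (fun x => !(x.2 == "Outer") && !(x.2 == "Inner"))) := by
  induction children with
  | nil => intro a b c; simp
  | cons child children ih =>
    intro a b c
    simp only [List.foldl_cons, List.map_cons, List.filter_cons]
    by_cases hOut : ((PySem.Dict.mk child).getD "relationship" "" == "Outer") = true
    · have hInn : ((PySem.Dict.mk child).getD "relationship" "" == "Inner") = false := by
        simp_all
      have hstep : pvStep (a, b, c) child
          = (a ++ [((PySem.Dict.mk child).getD "node_type" "", (PySem.Dict.mk child).getD "relationship" "")], b, c) := by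
        simp [pvStep, hOut]
      rw [hstep, ih]
      simp [hOut, hInn, List.append_assoc]
    · by_cases hInn : ((PySem.Dict.mk child).getD "relationship" "" == "Inner") = true
      · have hstep : pvStep (a, b, c) child
            = (a, b ++ [((PySem.Dict.mk child).getD "node_type" "", (PySem.Dict.mk child).getD "relationship" "")], c) := by
          simp [pvStep, hOut, hInn]
        rw [hstep, ih]
        simp [hOut, hInn, List.append_assoc]
      · have hstep : pvStep (a, b, c) child
            = (a, b, c ++ [((PySem.Dict.mk child).getD "node_type" "", (PySem.Dict.mk child).getD "relationship" "")]) := by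
          simp [pvStep, hOut, hInn]
        rw [hstep, ih]
        simp [hOut, hInn, List.append_assoc]

-- ===== VERDICT (by name: the statement is the Claim_ definition above) =====
theorem format_pattern_key_spec : Claim_equal_format_pattern_key := by
  intro parent_type children _ _
  unfold Spec_format_pattern_key
  simp only [format_pattern_key, format_pattern_key_alt]
  rw [pv_part3 children [] [] []]
  simp only [List.nil_append]
  rw [pv_sorted2_eq_buckets]
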